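-- pv_equiv track=rewrite | github.com/abhigyan2311/DSA | DSA/striver/tries/power-set.py | AllPossibleStrings
-- ===== SOURCE A (Python) =====
-- def AllPossibleStrings(s):
--     n = len(s)
--     ans = []
--     numLimit = 2**n
--     for num in range(1, numLimit):
--         substr = ""
--         for i in range(n):
--             if (num & (1<<i)) !=0 :
--                 substr += s[i]
--         ans.append(substr)
--     ans.sort()
--     return ans
-- ===== SOURCE B (Python) =====
-- def AllPossibleStrings(s):
--     # Recursive power-set generator instead of a bitmask scan: all subsets of
--     # s[:-1] are extended by s[-1]; the empty subset is dropped, then sorted.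
--     def subsets(chars):
--         if not chars:
--             return [""]
--         rest = subsets(chars[:-1])
--         return rest + [r + chars[-1] for r in rest]
--     return sorted(x for x in subsets(s) if x)
-- ===== Notes on version B (the rewrite author's own statement) =====
-- stated objective: alternative
-- what changed: Replaces the bitmask enumeration (for each num in 1..2^n, an inner loop over all n bit positions) with a recursive power-set generator that doubles the subset list once per character, drops the empty subset and sorts.
import Mathlib
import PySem

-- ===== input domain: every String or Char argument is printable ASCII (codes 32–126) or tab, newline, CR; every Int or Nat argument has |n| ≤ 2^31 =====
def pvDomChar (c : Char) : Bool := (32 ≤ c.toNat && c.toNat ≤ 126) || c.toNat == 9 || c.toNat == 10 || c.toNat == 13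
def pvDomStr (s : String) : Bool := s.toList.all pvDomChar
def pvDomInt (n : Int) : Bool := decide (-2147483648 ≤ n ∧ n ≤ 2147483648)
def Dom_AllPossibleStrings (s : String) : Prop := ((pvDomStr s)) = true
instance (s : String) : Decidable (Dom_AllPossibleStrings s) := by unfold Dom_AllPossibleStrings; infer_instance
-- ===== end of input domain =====

-- B replaces A's bitmask enumeration by a recursive power-set generator (double
-- the subset list per character, drop the empty subset, sort); same cost, different decomposition.


-- ===== PORT A =====
-- Python strings are carried as List Char (PySem convention); `substr += s[i]`
-- appends the looked-up character.  `1<<i` is Int.shiftLeft with the Nat shift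
-- `i.toNat` (exact here: i comes from range(n), so 0 ≤ i), `num & …` is Int.land.
def AllPossibleStrings (s : String) : List String :=
  let l := s.toList
  let n : Int := PySem.Str.len s
  let numLimit : Int := 2 ^ l.length          -- 2**n
  let ans : List String :=
    (PySem.List.pyRange 1 numLimit 1).foldl
      (fun ans num =>
        let substr : List Char :=
          (PySem.List.pyRange 0 n 1).foldl
            (fun substr i =>
              if Int.land num (Int.shiftLeft 1 i.toNat) ≠ 0 then
                substr ++ (PySem.List.pyGet? l i).toList
              else substr) []
        ans ++ [String.ofList substr]) []
  PySem.List.sorted ans (fun x => x) false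

-- ===== PORT B =====
-- subsets(chars) recurses on chars[:-1] and extends every subset by chars[-1];
-- the Lean helper consumes the REVERSED character list, which is exactly that
-- right-to-left recursion.
def pvSubsetsRev : List Char → List (List Char)
  | [] => [[]]
  | c :: cs =>
    let rest := pvSubsetsRev cs
    rest ++ rest.map (fun r => r ++ [c])

def AllPossibleStrings_alt (s : String) : List String :=
  PySem.List.sorted
    (((pvSubsetsRev s.toList.reverse).map String.ofList).filter (fun x => x ≠ ""))
    (fun x => x) false

-- ===== PRECONDITION & SPEC =====
def Spec_AllPossibleStrings (s : String) (out : List String) : Prop := out = AllPossibleStrings_alt s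
instance (s : String) (out : List String) : Decidable (Spec_AllPossibleStrings s out) := by unfold Spec_AllPossibleStrings; infer_instance

-- ===== CLAIM (what is proved, stated in full; the proofs are below) =====
def Claim_equal_AllPossibleStrings : Prop := ∀ (s : String), Dom_AllPossibleStrings s → Spec_AllPossibleStrings s (AllPossibleStrings s)

-- ===== LEMMAS AND PROOFS =====

-- the inner loop of A (build the subset string selected by num's bits)
def pvBuild (l : List Char) (num : Int) : List Char :=
  (PySem.List.pyRange 0 (l.length : Int) 1).foldl
    (fun substr i =>
      if Int.land num (Int.shiftLeft 1 i.toNat) ≠ 0 then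
        substr ++ (PySem.List.pyGet? l i).toList
      else substr) []

-- the outer loop of A, pre-sort, as a map over the bitmasks
def pvApre (l : List Char) : List (List Char) :=
  (PySem.List.pyRange 1 ((2 : Int) ^ l.length) 1).map (pvBuild l)

theorem pvBit_test (m k : Nat) :
    (Int.land ((m : Nat) : Int) (Int.shiftLeft 1 k) ≠ 0) = (Nat.testBit m k = true) := by
  rw [show Int.shiftLeft 1 k = (1 : Int) <<< k from rfl, Int.shiftLeft_eq']
  have h1 : ((1 : Int) * ((2 ^ k : Nat) : Int)) = ((2 ^ k : Nat) : Int) := by ring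
  rw [h1]
  have h2 : Int.land ((m : Nat) : Int) (((2 ^ k : Nat) : Int)) = ((m &&& 2 ^ k : Nat) : Int) := by
    simp [Int.land]
  rw [h2, Nat.and_two_pow]
  cases hb : Nat.testBit m k <;> simp [hb]

theorem pvBuild_foldl_acc (l : List Char) (num : Int) (r : List Int) (acc : List Char) :
    r.foldl (fun substr i =>
      if Int.land num (Int.shiftLeft 1 i.toNat) ≠ 0 then
        substr ++ (PySem.List.pyGet? l i).toList
      else substr) acc
    = acc ++ r.foldl (fun substr i =>
      if Int.land num (Int.shiftLeft 1 i.toNat) ≠ 0 then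
        substr ++ (PySem.List.pyGet? l i).toList
      else substr) [] := by
  induction r generalizing acc with
  | nil => simp
  | cons i r ih =>
    simp only [List.foldl_cons]
    rw [ih, ih (if Int.land num (Int.shiftLeft 1 i.toNat) ≠ 0 then [] ++ (PySem.List.pyGet? l i).toList else [])]
    split <;> simp

-- pvBuild depends only on the bits of num below l.length
theorem pvBuild_low_bits (l : List Char) (m m' : Nat)
    (h : ∀ j, j < l.length → Nat.testBit m j = Nat.testBit m' j) :
    pvBuild l ((m : Nat) : Int) = pvBuild l ((m' : Nat) : Int) := by
  unfold pvBuild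
  apply PySem.List.foldl_congr_mem
  intro acc i hi
  rw [PySem.List.mem_pyRange_one] at hi
  have hj : i.toNat < l.length := by omega
  have hcond : (Int.land ((m : Nat) : Int) (Int.shiftLeft 1 i.toNat) ≠ 0)
      = (Int.land ((m' : Nat) : Int) (Int.shiftLeft 1 i.toNat) ≠ 0) := by
    rw [pvBit_test, pvBit_test, h i.toNat hj]
  simp only [hcond]

theorem pvBuild_zero (l : List Char) : pvBuild l (((0 : Nat) : Int)) = [] := by
  unfold pvBuild
  generalize PySem.List.pyRange 0 (l.length : Int) 1 = r
  induction r with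
  | nil => rfl
  | cons i r ih =>
    simp only [List.foldl_cons]
    rw [if_neg, ih]
    rw [pvBit_test]
    simp

-- A's inner loop on l ++ [c]: the old string, plus c iff bit l.length is set
theorem pvBuild_append (l : List Char) (c : Char) (m : Nat) :
    pvBuild (l ++ [c]) ((m : Nat) : Int)
      = pvBuild l ((m : Nat) : Int) ++ (if Nat.testBit m l.length then [c] else []) := by
  unfold pvBuild
  have hlen : (((l ++ [c]).length : Nat) : Int) = (l.length : Int) + 1 := by simp
  rw [hlen, PySem.List.pyRange_one_succ_right (by positivity), List.foldl_append]
  have hagree :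
      (PySem.List.pyRange 0 (l.length : Int) 1).foldl
        (fun substr i =>
          if Int.land ((m : Nat) : Int) (Int.shiftLeft 1 i.toNat) ≠ 0 then
            substr ++ (PySem.List.pyGet? (l ++ [c]) i).toList
          else substr) []
      = (PySem.List.pyRange 0 (l.length : Int) 1).foldl
        (fun substr i =>
          if Int.land ((m : Nat) : Int) (Int.shiftLeft 1 i.toNat) ≠ 0 then
            substr ++ (PySem.List.pyGet? l i).toList
          else substr) [] := by
    apply PySem.List.foldl_congr_mem
    intro acc i hi
    rw [PySem.List.mem_pyRange_one] at hi
    have hget : PySem.List.pyGet? (l ++ [c]) i = PySem.List.pyGet? l i := by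
      rw [PySem.List.pyGet?_of_nonneg _ hi.1, PySem.List.pyGet?_of_nonneg _ hi.1]
      rw [List.getElem?_append_left]
      omega
    rw [hget]
  rw [hagree]
  rw [pvBuild_foldl_acc (l ++ [c])]
  congr 1
  simp only [List.foldl_cons, List.foldl_nil]
  have hget : PySem.List.pyGet? (l ++ [c]) ((l.length : Nat) : Int) = some c := by
    have := PySem.List.pyGet?_append_length l [] c
    simpa using this
  have htn : ((l.length : Int)).toNat = l.length := by omega
  rw [htn, hget]
  by_cases hb : Nat.testBit m l.length
  · rw [if_pos, if_pos hb]
    · rfl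
    · rw [pvBit_test]; exact hb
  · rw [if_neg, if_neg hb]
    rw [pvBit_test]
    simpa using hb

theorem pvApre_append (l : List Char) (c : Char) :
    pvApre (l ++ [c]) = pvApre l ++ ([] :: pvApre l).map (fun r => r ++ [c]) := by
  unfold pvApre
  have hlen : (l ++ [c]).length = l.length + 1 := by simp
  rw [hlen]
  have hpow1 : (1 : Int) ≤ (2 : Int) ^ l.length := one_le_pow₀ (by norm_num)
  have hpow2 : (2 : Int) ^ l.length ≤ (2 : Int) ^ (l.length + 1) := by
    rw [pow_succ]; nlinarith
  rw [PySem.List.pyRange_one_append 1 ((2:Int) ^ l.length) ((2:Int) ^ (l.length + 1)) hpow1 hpow2,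
      List.map_append]
  congr 1
  · -- low half: bit l.length of num is 0
    apply List.map_congr_left
    intro num hnum
    rw [PySem.List.mem_pyRange_one] at hnum
    obtain ⟨m, rfl⟩ : ∃ m : Nat, num = (m : Int) := ⟨num.toNat, by omega⟩
    rw [pvBuild_append]
    have hm : m < 2 ^ l.length := by
      have h2 := hnum.2
      have : ((m : Nat) : Int) < ((2 ^ l.length : Nat) : Int) := by push_cast; exact h2
      exact_mod_cast this
    rw [Nat.testBit_lt_two_pow hm]
    simp
  · -- high half: num = 2^n + k with k < 2^n; bit n is 1, lower bits are k's
    rw [PySem.List.pyRange_one, PySem.List.pyRange_one]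
    have h0 : (((2:Int) ^ l.length) - 1).toNat = 2 ^ l.length - 1 := by
      rw [show ((2:Int) ^ l.length - 1) = ((2 ^ l.length - 1 : Nat) : Int) by
        have h : (1:Nat) ≤ 2 ^ l.length := Nat.one_le_two_pow
        push_cast [h]; ring]
      exact Int.toNat_natCast _
    have h1 : (((2:Int) ^ (l.length + 1)) - (2:Int) ^ l.length).toNat = 2 ^ l.length := by
      rw [pow_succ, show ((2:Int) ^ l.length * 2 - (2:Int) ^ l.length) = ((2 ^ l.length : Nat) : Int) by
        push_cast; ring]
      exact Int.toNat_natCast _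
    rw [h0, h1, List.map_map, List.map_map]
    have hcons : List.map ((pvBuild l) ∘ fun k : Nat => 0 + (k : Int)) (List.range (2 ^ l.length))
        = ([] : List Char) :: List.map ((pvBuild l) ∘ fun k : Nat => 1 + (k : Int)) (List.range (2 ^ l.length - 1)) := by
      have hk : 2 ^ l.length = (2 ^ l.length - 1) + 1 := by
        have h : 0 < 2 ^ l.length := by positivity
        omega
      conv_lhs => rw [hk, List.range_succ_eq_map]
      rw [List.map_cons, List.map_map]
      congr 1
      · simp only [Function.comp]
        rw [show (0 : Int) + ((0:Nat) : Int) = ((0 : Nat) : Int) by simp, pvBuild_zero]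
      · apply List.map_congr_left
        intro k _
        simp only [Function.comp]
        congr 1
        push_cast
        ring
    rw [← hcons, List.map_map]
    apply List.map_congr_left
    intro k hk
    rw [List.mem_range] at hk
    simp only [Function.comp]
    have hcast1 : ((2:Int) ^ l.length + (k : Int)) = ((2 ^ l.length + k : Nat) : Int) := by
      push_cast; ring
    have hcast2 : ((0:Int) + (k : Int)) = ((k : Nat) : Int) := by push_cast; ring
    rw [hcast1, hcast2, pvBuild_append]
    have hb : Nat.testBit (2 ^ l.length + k) l.length = true := by
      rw [Nat.testBit_two_pow_add_eq, Nat.testBit_lt_two_pow hk]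
      rfl
    rw [hb]
    have hz : pvBuild l ((2 ^ l.length + k : Nat) : Int) = pvBuild l ((k : Nat) : Int) := by
      apply pvBuild_low_bits
      intro j hj
      exact Nat.testBit_two_pow_add_gt hj k
    rw [hz]
    simp

theorem pvApre_nil : pvApre [] = [] := by
  unfold pvApre
  rw [show ((2:Int) ^ ([] : List Char).length) = 1 by simp]
  rw [PySem.List.pyRange_one_eq_nil (by omega)]
  rfl

-- B's generator on the reversed list is the empty subset followed by A's pre-sort list
theorem pvSubsetsRev_eq (r : List Char) : pvSubsetsRev r = [] :: pvApre r.reverse := by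
  induction r with
  | nil => rw [pvSubsetsRev, List.reverse_nil, pvApre_nil]
  | cons c cs ih =>
    rw [pvSubsetsRev, ih, List.reverse_cons, pvApre_append]
    simp

-- every subset A enumerates (num ≥ 1) is non-empty
theorem pvApre_ne_nil (l : List Char) : ∀ x ∈ pvApre l, x ≠ [] := by
  induction l using List.reverseRecOn with
  | nil => rw [pvApre_nil]; intro x hx; cases hx
  | append_singleton l c ih =>
    rw [pvApre_append]
    intro x hx
    rcases List.mem_append.mp hx with h | h
    · exact ih x h
    · rcases List.mem_map.mp h with ⟨r, _, rfl⟩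
      simp

theorem pvOfList_ne_empty (x : List Char) (hx : x ≠ []) : String.ofList x ≠ "" := by
  intro h
  apply hx
  have h2 := congrArg String.toList h
  simpa using h2

theorem AllPossibleStrings_spec : Claim_equal_AllPossibleStrings := by
  intro s _
  show AllPossibleStrings s = AllPossibleStrings_alt s
  unfold AllPossibleStrings AllPossibleStrings_alt
  simp only [PySem.Str.len_eq]
  rw [pvSubsetsRev_eq, List.reverse_reverse]
  simp only [PySem.List.foldl_append_singleton_eq_map, List.nil_append]
  have hmap : List.map (fun num => String.ofList
        ((PySem.List.pyRange 0 (s.toList.length : Int) 1).foldl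
          (fun substr i =>
            if Int.land num (Int.shiftLeft 1 i.toNat) ≠ 0 then
              substr ++ (PySem.List.pyGet? s.toList i).toList
            else substr) []))
        (PySem.List.pyRange 1 (2 ^ s.toList.length) 1)
      = (pvApre s.toList).map String.ofList := by
    unfold pvApre pvBuild
    rw [List.map_map]
    rfl
  rw [hmap]
  congr 1
  rw [List.map_cons, List.filter_cons]
  have h0 : (decide (String.ofList ([] : List Char) ≠ "")) = false := by decide
  rw [h0]
  simp only [Bool.false_eq_true, if_false]
  rw [List.filter_map]
  have hfe : List.filter ((fun x => decide (x ≠ "")) ∘ String.ofList) (pvApre s.toList)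
      = pvApre s.toList := by
    apply List.filter_eq_self.mpr
    intro x hx
    simp only [Function.comp]
    exact decide_eq_true (pvOfList_ne_empty x (pvApre_ne_nil s.toList x hx))
  rw [hfe]
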